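-- pv_equiv track=rewrite | github.com/kory75/ragul | ragul/stdlib/datum.py | _php_fmt_to_strptime
-- ===== SOURCE A (Python) =====
-- _PHP_TO_STRPTIME: dict[str, str] = {
--     'Y': '%Y', 'y': '%y',
--     'm': '%m', 'd': '%d',
--     'H': '%H', 'h': '%I',
--     'i': '%M', 's': '%S',
--     'A': '%p', 'a': '%p',
--     'D': '%a', 'l': '%A',
--     'M': '%b', 'F': '%B',
-- }
--
-- _PHP_PARSE_UNSUPPORTED = frozenset('nGjwWzUtL')
--
-- def _php_fmt_to_strptime(fmt: str) -> str | None: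
--     """Convert a PHP format string to a strptime pattern.
--
--     Returns None if the format contains unsupported parse chars.
--     """
--     out: list[str] = []
--     i = 0
--     while i < len(fmt):
--         ch = fmt[i]
--         if ch == '\\' and i + 1 < len(fmt):
--             out.append(_re_escape(fmt[i + 1]))
--             i += 2
--         elif ch in _PHP_PARSE_UNSUPPORTED:
--             return None
--         elif ch in _PHP_TO_STRPTIME:
--             out.append(_PHP_TO_STRPTIME[ch])
--             i += 1
--         else:
--             out.append(ch)
--             i += 1
--     return "".join(out)
--
-- def _re_escape(ch: str) -> str:
--     """Escape a literal character for a strptime pattern (minimal)."""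
--     return ch  # strptime doesn't need regex escaping
-- ===== SOURCE B (Python) =====
-- _PHP_TO_STRPTIME: dict[str, str] = {
--     'Y': '%Y', 'y': '%y',
--     'm': '%m', 'd': '%d',
--     'H': '%H', 'h': '%I',
--     'i': '%M', 's': '%S',
--     'A': '%p', 'a': '%p',
--     'D': '%a', 'l': '%A',
--     'M': '%b', 'F': '%B',
-- }
--
-- _PHP_PARSE_UNSUPPORTED = frozenset('nGjwWzUtL')
--
--
-- def _tokenize(fmt):
--     """Split fmt into tokens: a backslash-escape pair, or a single char.
--
--     A trailing lone backslash becomes its own single-char token."""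
--     toks = []
--     it = iter(fmt)
--     for ch in it:
--         if ch == '\\':
--             nxt = next(it, None)
--             toks.append(ch if nxt is None else ch + nxt)
--         else:
--             toks.append(ch)
--     return toks
--
--
-- def _php_fmt_to_strptime(fmt: str) -> str | None:
--     toks = _tokenize(fmt)
--     if any(len(t) == 1 and t in _PHP_PARSE_UNSUPPORTED for t in toks):
--         return None
--     return ''.join(t[1] if len(t) == 2 else _PHP_TO_STRPTIME.get(t, t)
--                    for t in toks)
-- ===== Notes on version B (the rewrite author's own statement) =====
-- stated objective: idiomatic
-- what changed: B first tokenizes the format into escape-pair or single-char tokens, then does a flat any() check for unsupported chars and a join over a mapping generator, replacing A's manual index arithmetic and in-loop early return.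
import Mathlib
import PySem

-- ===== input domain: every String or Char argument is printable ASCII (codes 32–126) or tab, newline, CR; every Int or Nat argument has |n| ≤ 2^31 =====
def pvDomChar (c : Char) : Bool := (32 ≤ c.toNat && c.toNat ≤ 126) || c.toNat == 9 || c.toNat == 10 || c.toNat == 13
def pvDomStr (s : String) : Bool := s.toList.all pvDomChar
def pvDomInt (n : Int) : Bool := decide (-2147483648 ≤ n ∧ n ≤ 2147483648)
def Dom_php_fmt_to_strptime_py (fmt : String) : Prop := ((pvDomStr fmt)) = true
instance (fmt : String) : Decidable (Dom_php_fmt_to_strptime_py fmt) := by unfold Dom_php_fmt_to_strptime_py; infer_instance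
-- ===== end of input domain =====

-- B re-implements A as tokenize-then-map (one unsupported-check pass + one join pass)
-- instead of A's manual index walk; objective: more idiomatic decomposition, same cost.

-- shared module constants (the PHP→strptime table and the unsupported set)
def phpPairs : List (Char × List Char) :=
  [('Y', ['%','Y']), ('y', ['%','y']),
   ('m', ['%','m']), ('d', ['%','d']),
   ('H', ['%','H']), ('h', ['%','I']),
   ('i', ['%','M']), ('s', ['%','S']),
   ('A', ['%','p']), ('a', ['%','p']),
   ('D', ['%','a']), ('l', ['%','A']),
   ('M', ['%','b']), ('F', ['%','B'])]

def phpUnsupported : List Char := ['n','G','j','w','W','z','U','t','L']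

-- ===== PORT A =====
-- _re_escape(ch): identity
def reEscapeA (c : Char) : List Char := [c]

-- A's while loop over the index, transliterated as recursion over the remaining
-- characters with the `out` accumulator (out: list of emitted pieces, flattened)
def aLoop : List Char → List Char → Option (List Char)
  | [], out => some out
  | '\\' :: c :: rest, out => aLoop rest (out ++ reEscapeA c)
  | c :: rest, out =>
      if c ∈ phpUnsupported then none
      else match phpPairs.lookup c with
        | some v => aLoop rest (out ++ v)
        | none => aLoop rest (out ++ [c])

def php_fmt_to_strptime_py (fmt : String) : Option String :=
  (aLoop fmt.toList []).map (fun l => String.ofList l)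

-- ===== PORT B =====
-- _tokenize: each token is a backslash-escape pair or a single character
def bTokenize : List Char → List (List Char)
  | [] => []
  | '\\' :: c :: rest => ['\\', c] :: bTokenize rest
  | c :: rest => [c] :: bTokenize rest

-- `len(t) == 1 and t in _PHP_PARSE_UNSUPPORTED`
def bBad (t : List Char) : Bool :=
  match t with
  | [c] => c ∈ phpUnsupported
  | _ => false

-- `t[1] if len(t) == 2 else _PHP_TO_STRPTIME.get(t, t)`
def bEmit (t : List Char) : List Char :=
  if t.length = 2 then t.tail
  else match t with
    | [c] => (phpPairs.lookup c).getD [c]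
    | _ => t

def php_fmt_to_strptime_py_alt (fmt : String) : Option String :=
  let toks := bTokenize fmt.toList
  if toks.any bBad then none
  else some (String.ofList (toks.flatMap bEmit))

-- ===== PRECONDITION & SPEC =====
def Spec_php_fmt_to_strptime_py (fmt : String) (out : Option String) : Prop := out = php_fmt_to_strptime_py_alt fmt
instance (fmt : String) (out : Option String) : Decidable (Spec_php_fmt_to_strptime_py fmt out) := by unfold Spec_php_fmt_to_strptime_py; infer_instance

-- ===== CLAIM (what is proved, stated in full; the proofs are below) =====
def Claim_equal_php_fmt_to_strptime_py : Prop := ∀ (fmt : String), Dom_php_fmt_to_strptime_py fmt → Spec_php_fmt_to_strptime_py fmt (php_fmt_to_strptime_py fmt)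

-- ===== LEMMAS AND PROOFS =====

theorem aLoop_eq (l : List Char) : ∀ out,
    aLoop l out =
      if (bTokenize l).any bBad then none
      else some (out ++ (bTokenize l).flatMap bEmit) := by
  induction l using bTokenize.induct with
  | case1 => intro out; simp [aLoop, bTokenize]
  | case2 c rest ih =>
      intro out
      simp only [aLoop, bTokenize, reEscapeA, ih]
      simp [bBad, bEmit]
  | case3 c rest h ih =>
      intro out
      -- c :: rest where the escape-pair pattern did not match
      match c, rest, h with
      | c, rest, h =>
        rw [show aLoop (c :: rest) out =
              (if c ∈ phpUnsupported then none
               else match phpPairs.lookup c with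
                 | some v => aLoop rest (out ++ v)
                 | none => aLoop rest (out ++ [c])) from ?_,
            show bTokenize (c :: rest) = [c] :: bTokenize rest from ?_]
        · by_cases hu : c ∈ phpUnsupported
          · simp [hu, bBad]
          · cases hl : phpPairs.lookup c with
            | some v => simp [hu, hl, ih, bBad, bEmit]
            | none => simp [hu, hl, ih, bBad, bEmit]
        · cases rest with
          | nil => cases hc : decide (c = '\\') <;> simp_all [bTokenize]
          | cons c2 r2 =>
              rcases eq_or_ne c '\\' with hc | hc
              · exact (h c2 r2 hc rfl).elim
              · simp [bTokenize]
        · cases rest with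
          | nil => cases hc : decide (c = '\\') <;> simp_all [aLoop]
          | cons c2 r2 =>
              rcases eq_or_ne c '\\' with hc | hc
              · exact (h c2 r2 hc rfl).elim
              · simp [aLoop]

-- ===== VERDICT (by name: the statement is the Claim_ definition above) =====
theorem php_fmt_to_strptime_py_spec : Claim_equal_php_fmt_to_strptime_py := by
  intro fmt _
  unfold Spec_php_fmt_to_strptime_py php_fmt_to_strptime_py php_fmt_to_strptime_py_alt
  rw [aLoop_eq]
  by_cases h : (bTokenize fmt.toList).any bBad = true <;> simp [h]
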